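-- pv_equiv track=rewrite | github.com/kievlanin/drip_design | main_app/paths.py | _pick_earthdata_block
-- ===== SOURCE A (Python) =====
-- from typing import List, Optional, Tuple
--
-- def _pick_earthdata_block(blocks: List[Tuple[str, str, str]]) -> Optional[Tuple[str, str]]:
--     if not blocks:
--         return None
--     for m, u, p in blocks:
--         ml = m.lower()
--         if "urs.earthdata.nasa.gov" in ml or ml.endswith("earthdata.nasa.gov"):
--             return (u, p)
--     for m, u, p in blocks:
--         if "earthdata" in m.lower():
--             return (u, p)
--     m, u, p = blocks[-1]
--     return (u, p)
-- ===== SOURCE B (Python) =====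
-- from typing import List, Optional, Tuple
--
-- def _pick_earthdata_block(blocks: List[Tuple[str, str, str]]) -> Optional[Tuple[str, str]]:
--     # Rank each block (0 = strong earthdata match, 1 = weak, 2 = none) and keep
--     # the strictly best-ranked candidate, seeded with the last block at rank 2;
--     # strict improvement means the first block of the winning rank is kept.
--     if not blocks:
--         return None
--
--     def rank(m: str) -> int:
--         ml = m.lower()
--         strong = "urs.earthdata.nasa.gov" in ml or ml.endswith("earthdata.nasa.gov")
--         return 0 if strong else (1 if "earthdata" in ml else 2)
--
--     _, u0, p0 = blocks[-1]
--     best = (2, (u0, p0))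
--     for m, u, p in blocks:
--         r = rank(m)
--         if r < best[0]:
--             best = (r, (u, p))
--     return best[1]
-- ===== Notes on version B (the rewrite author's own statement) =====
-- stated objective: alternative
-- what changed: Replaces A's two staged scans (strong first, then weak, then last block) by a scoring argmin: each block gets a rank 0/1/2 and one fold keeps the strictly-best candidate seeded with the last block.
import Mathlib
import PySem

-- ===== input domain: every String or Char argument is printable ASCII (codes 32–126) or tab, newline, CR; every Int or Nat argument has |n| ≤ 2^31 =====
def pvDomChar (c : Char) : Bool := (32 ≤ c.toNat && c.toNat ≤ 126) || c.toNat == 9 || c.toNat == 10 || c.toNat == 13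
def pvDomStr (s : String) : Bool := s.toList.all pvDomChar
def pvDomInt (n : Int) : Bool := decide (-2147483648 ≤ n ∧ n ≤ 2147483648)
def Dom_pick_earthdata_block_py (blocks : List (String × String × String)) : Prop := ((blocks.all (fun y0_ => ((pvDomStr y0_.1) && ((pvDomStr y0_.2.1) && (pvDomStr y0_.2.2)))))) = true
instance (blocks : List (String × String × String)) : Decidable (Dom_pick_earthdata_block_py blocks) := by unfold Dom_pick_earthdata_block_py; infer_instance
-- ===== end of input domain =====

-- B replaces A's two staged scans by a scoring argmin: rank blocks 0/1/2 and
-- keep the strictly-best candidate in one fold, seeded with the last block.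

-- ===== PORT A =====
-- first loop of A: first block whose lowered machine contains/ends with the strong marker
def pickLoopStrong : List (String × String × String) → Option (String × String)
  | [] => none
  | (m, u, p) :: t =>
    let ml := PySem.Str.lower m
    if PySem.Str.isIn "urs.earthdata.nasa.gov" ml || PySem.Str.endswith ml "earthdata.nasa.gov" then
      some (u, p)
    else pickLoopStrong t

-- second loop of A: first block whose lowered machine contains "earthdata"
def pickLoopWeak : List (String × String × String) → Option (String × String)
  | [] => none
  | (m, u, p) :: t =>
    if PySem.Str.isIn "earthdata" (PySem.Str.lower m) then some (u, p)
    else pickLoopWeak t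

def pick_earthdata_block_py (blocks : List (String × String × String)) : Option (String × String) :=
  if blocks.isEmpty then none
  else
    match pickLoopStrong blocks with
    | some r => some r
    | none =>
      match pickLoopWeak blocks with
      | some r => some r
      | none =>
        match PySem.List.pyGet? blocks (-1) with
        | some (_, u, p) => some (u, p)
        | none => none

-- ===== PORT B =====
-- rank of a machine name: 0 strong match, 1 weak match, 2 no match
def pickRank (m : String) : Nat :=
  let ml := PySem.Str.lower m
  if PySem.Str.isIn "urs.earthdata.nasa.gov" ml || PySem.Str.endswith ml "earthdata.nasa.gov" then 0
  else if PySem.Str.isIn "earthdata" ml then 1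
  else 2

-- the fold of B: keep the best-ranked candidate, improving only on strictly smaller rank
def pickBest : List (String × String × String) → Nat × (String × String) → Nat × (String × String)
  | [], best => best
  | (m, u, p) :: t, best =>
    pickBest t (if pickRank m < best.1 then (pickRank m, (u, p)) else best)

def pick_earthdata_block_py_alt (blocks : List (String × String × String)) : Option (String × String) :=
  match PySem.List.pyGet? blocks (-1) with
  | none => none
  | some (_, u0, p0) => some (pickBest blocks (2, (u0, p0))).2

-- ===== PRECONDITION & SPEC =====
def Spec_pick_earthdata_block_py (blocks : List (String × String × String)) (out : Option (String × String)) : Prop := out = pick_earthdata_block_py_alt blocks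
instance (blocks : List (String × String × String)) (out : Option (String × String)) : Decidable (Spec_pick_earthdata_block_py blocks out) := by unfold Spec_pick_earthdata_block_py; infer_instance

-- ===== CLAIM (what is proved, stated in full; the proofs are below) =====
def Claim_equal_pick_earthdata_block_py : Prop := ∀ (blocks : List (String × String × String)), Dom_pick_earthdata_block_py blocks → Spec_pick_earthdata_block_py blocks (pick_earthdata_block_py blocks)

-- ===== LEMMAS AND PROOFS =====

-- the fold computes: first strong match at rank 0; else the seed if its rank ≤ 1;
-- else the first weak match at rank 1; else the seed
theorem pickBest_eq (bs : List (String × String × String)) (b : Nat × (String × String))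
    (hb : b.1 ≤ 2) :
    pickBest bs b =
      if b.1 = 0 then b
      else
        match pickLoopStrong bs with
        | some s => (0, s)
        | none =>
          if b.1 = 1 then b
          else
            match pickLoopWeak bs with
            | some w => (1, w)
            | none => b := by
  induction bs generalizing b with
  | nil => simp [pickBest, pickLoopStrong, pickLoopWeak]
  | cons h t ih =>
    obtain ⟨m, u, p⟩ := h
    obtain ⟨r, v⟩ := b
    have hr : r ≤ 2 := hb
    simp only [pickBest, pickLoopStrong, pickLoopWeak, pickRank]
    interval_cases r <;> split_ifs <;> simp_all

-- ===== VERDICT (by name: the statement is the Claim_ definition above) =====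
theorem pick_earthdata_block_py_spec : Claim_equal_pick_earthdata_block_py := by
  intro blocks _
  unfold Spec_pick_earthdata_block_py pick_earthdata_block_py pick_earthdata_block_py_alt
  by_cases he : blocks.isEmpty
  · have : blocks = [] := List.isEmpty_iff.mp he
    subst this
    simp [PySem.List.pyGet?, PySem.List.pyIdx?]
  · simp only [he, Bool.false_eq_true]
    have hne : blocks ≠ [] := by simpa [List.isEmpty_iff] using he
    have hget : ∃ x, PySem.List.pyGet? blocks (-1) = some x := by
      cases hx : PySem.List.pyGet? blocks (-1) with
      | some x => exact ⟨x, rfl⟩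
      | none =>
        exfalso
        have : blocks.length ≠ 0 := by simpa using congrArg List.length |>.mt (fun h => hne (List.length_eq_zero_iff.mp h))
        simp [PySem.List.pyGet?, PySem.List.pyIdx?] at hx
        omega
    obtain ⟨⟨m0, u0, p0⟩, hx⟩ := hget
    simp only [hx]
    rw [pickBest_eq _ _ (by norm_num)]
    cases pickLoopStrong blocks <;> cases pickLoopWeak blocks <;> simp
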